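-- pv_equiv track=rewrite | github.com/domathang/algorithm | 프로그래머스/Level 2/땅따먹기.py | solution
-- ===== SOURCE A (Python) =====
-- def max_of_3(row, num):
--     return max([row[i] for i in range(len(row)) if i != num])
--
-- def solution(land):
--     d = [[0, 0, 0, 0] for _ in range(len(land))]
--     d[0][0] = land[0][0]
--     d[0][1] = land[0][1]
--     d[0][2] = land[0][2]
--     d[0][3] = land[0][3]
--
--     for i in range(1, len(d)):
--         for j in range(4):
--             d[i][j] = max_of_3(d[i-1], j) + land[i][j]
--
--     return max(d[len(land)-1])
-- ===== SOURCE B (Python) =====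
-- def _top2(a, b, c, d):
--     # (largest, first index of the largest, largest among the other three positions)
--     if a >= b and a >= c and a >= d:
--         return a, 0, max(b, c, d)
--     if b >= c and b >= d:
--         return b, 1, max(a, c, d)
--     if c >= d:
--         return c, 2, max(a, b, d)
--     return d, 3, max(a, b, c)
--
-- def solution(land):
--     r = land[0]
--     b1, i1, b2 = _top2(r[0], r[1], r[2], r[3])
--     for row in land[1:]:
--         s0 = row[0] + (b2 if i1 == 0 else b1)
--         s1 = row[1] + (b2 if i1 == 1 else b1)
--         s2 = row[2] + (b2 if i1 == 2 else b1)
--         s3 = row[3] + (b2 if i1 == 3 else b1)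
--         b1, i1, b2 = _top2(s0, s1, s2, s3)
--     return b1
-- ===== Notes on version B (the rewrite author's own statement) =====
-- stated objective: alternative
-- what changed: Replaces A's DP table with per-cell exclusion-max scans by three rolling scalars (best value, its first column, second-best value) updated by explicit comparisons; each new cell adds second-best in the best column and best elsewhere, and no table or row list is kept.
import Mathlib
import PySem

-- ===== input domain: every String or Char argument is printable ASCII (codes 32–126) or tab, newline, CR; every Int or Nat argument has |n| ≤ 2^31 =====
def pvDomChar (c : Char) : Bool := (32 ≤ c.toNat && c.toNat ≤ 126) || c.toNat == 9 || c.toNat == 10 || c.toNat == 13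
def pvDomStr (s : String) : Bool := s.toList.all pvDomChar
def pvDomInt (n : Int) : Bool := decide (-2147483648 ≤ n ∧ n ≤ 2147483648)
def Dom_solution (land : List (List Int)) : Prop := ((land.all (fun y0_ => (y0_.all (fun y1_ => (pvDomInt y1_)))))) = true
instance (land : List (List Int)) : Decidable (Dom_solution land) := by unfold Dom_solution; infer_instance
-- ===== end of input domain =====

-- B replaces A's DP table and per-cell exclusion-max scans by three rolling scalars
-- (best, its first column index, second-best) updated by explicit comparisons.

-- ===== PORT A =====
-- max_of_3(row, num) = max of row's entries at indices ≠ num (getD 0 never fires inside Pre_)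
def max_of_3 (row : List Int) (num : Nat) : Int :=
  (PySem.List.max? (((List.range row.length).filter (fun i => i ≠ num)).map
      (fun i => (PySem.List.pyGet? row (i : Int)).getD 0)) (fun y => y)).getD 0

def stepA (prev row : List Int) : List Int :=
  (List.range 4).map (fun j => max_of_3 prev j + (PySem.List.pyGet? row (j : Int)).getD 0)

-- A's table d is only read through its previous row, so the fold carries that row;
-- [] (where Python raises IndexError) is excluded by Pre_solution.
def solution (land : List (List Int)) : Int :=
  match land with
  | [] => 0
  | r0 :: rest =>
    let first := [(PySem.List.pyGet? r0 0).getD 0, (PySem.List.pyGet? r0 1).getD 0,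
                  (PySem.List.pyGet? r0 2).getD 0, (PySem.List.pyGet? r0 3).getD 0]
    let last := rest.foldl stepA first
    (PySem.List.max? last (fun y => y)).getD 0

-- ===== PORT B =====
-- _top2: (largest, first index of the largest, largest among the other three positions)
def top2 (a b c d : Int) : Int × Nat × Int :=
  if a ≥ b ∧ a ≥ c ∧ a ≥ d then (a, 0, max b (max c d))
  else if b ≥ c ∧ b ≥ d then (b, 1, max a (max c d))
  else if c ≥ d then (c, 2, max a (max b d))
  else (d, 3, max a (max b c))

def stepB (st : Int × Nat × Int) (row : List Int) : Int × Nat × Int :=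
  let b1 := st.1
  let i1 := st.2.1
  let b2 := st.2.2
  let s0 := (PySem.List.pyGet? row (0 : Int)).getD 0 + (if i1 = 0 then b2 else b1)
  let s1 := (PySem.List.pyGet? row (1 : Int)).getD 0 + (if i1 = 1 then b2 else b1)
  let s2 := (PySem.List.pyGet? row (2 : Int)).getD 0 + (if i1 = 2 then b2 else b1)
  let s3 := (PySem.List.pyGet? row (3 : Int)).getD 0 + (if i1 = 3 then b2 else b1)
  top2 s0 s1 s2 s3

def solution_alt (land : List (List Int)) : Int :=
  match land with
  | [] => 0
  | r0 :: rest =>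
    let st := top2 ((PySem.List.pyGet? r0 0).getD 0) ((PySem.List.pyGet? r0 1).getD 0)
                   ((PySem.List.pyGet? r0 2).getD 0) ((PySem.List.pyGet? r0 3).getD 0)
    (rest.foldl stepB st).1

-- ===== PRECONDITION & SPEC =====
-- Pre_ excludes exactly the inputs where Python A raises IndexError: empty land, or a row
-- with fewer than 4 entries.
def Pre_solution (land : List (List Int)) : Prop :=
  land ≠ [] ∧ ∀ row ∈ land, 4 ≤ row.length
instance (land : List (List Int)) : Decidable (Pre_solution land) := by
  unfold Pre_solution; infer_instance

def pvWitness_solution : List (List Int) := [[1, 2, 3, 5], [5, 6, 7, 8], [4, 3, 2, 1]]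

def Spec_solution (land : List (List Int)) (out : Int) : Prop := out = solution_alt land
instance (land : List (List Int)) (out : Int) : Decidable (Spec_solution land out) := by
  unfold Spec_solution; infer_instance

-- ===== CLAIM =====
def Claim_equal_solution : Prop :=
  ∀ (land : List (List Int)), Dom_solution land → Pre_solution land →
    Spec_solution land (solution land)

-- ===== LEMMAS AND PROOFS =====
theorem max?_quad (a b c d : Int) :
    PySem.List.max? [a, b, c, d] (fun y => y) = some (max (max (max a b) c) d) := by
  rw [PySem.List.max?_id_cons]; simp [List.foldl_cons]

theorem mo3_0 (a b c d : Int) : max_of_3 [a,b,c,d] 0 = max b (max c d) := by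
  simp [max_of_3, List.range_succ, PySem.List.pyGet?, PySem.List.pyIdx?, PySem.List.max?_id_cons]
theorem mo3_1 (a b c d : Int) : max_of_3 [a,b,c,d] 1 = max a (max c d) := by
  simp [max_of_3, List.range_succ, PySem.List.pyGet?, PySem.List.pyIdx?, PySem.List.max?_id_cons]
theorem mo3_2 (a b c d : Int) : max_of_3 [a,b,c,d] 2 = max a (max b d) := by
  simp [max_of_3, List.range_succ, PySem.List.pyGet?, PySem.List.pyIdx?, PySem.List.max?_id_cons]
theorem mo3_3 (a b c d : Int) : max_of_3 [a,b,c,d] 3 = max a (max b c) := by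
  simp [max_of_3, List.range_succ, PySem.List.pyGet?, PySem.List.pyIdx?, PySem.List.max?_id_cons]

-- the summary selects the same value A's exclusion max computes, in every column
theorem sel0 (a b c d : Int) :
    (if (top2 a b c d).2.1 = 0 then (top2 a b c d).2.2 else (top2 a b c d).1)
      = max_of_3 [a,b,c,d] 0 := by
  rw [mo3_0]; unfold top2; split_ifs <;> simp_all <;> omega
theorem sel1 (a b c d : Int) :
    (if (top2 a b c d).2.1 = 1 then (top2 a b c d).2.2 else (top2 a b c d).1)
      = max_of_3 [a,b,c,d] 1 := by
  rw [mo3_1]; unfold top2; split_ifs <;> simp_all <;> omega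
theorem sel2 (a b c d : Int) :
    (if (top2 a b c d).2.1 = 2 then (top2 a b c d).2.2 else (top2 a b c d).1)
      = max_of_3 [a,b,c,d] 2 := by
  rw [mo3_2]; unfold top2; split_ifs <;> simp_all <;> omega
theorem sel3 (a b c d : Int) :
    (if (top2 a b c d).2.1 = 3 then (top2 a b c d).2.2 else (top2 a b c d).1)
      = max_of_3 [a,b,c,d] 3 := by
  rw [mo3_3]; unfold top2; split_ifs <;> simp_all <;> omega

theorem top2_fst (a b c d : Int) :
    (top2 a b c d).1 = max (max (max a b) c) d := by
  unfold top2; split_ifs <;> simp_all <;> omega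

theorem stepA_shape (a b c d : Int) (row : List Int) :
    stepA [a, b, c, d] row =
      [(PySem.List.pyGet? row (0:Int)).getD 0 + max_of_3 [a,b,c,d] 0,
       (PySem.List.pyGet? row (1:Int)).getD 0 + max_of_3 [a,b,c,d] 1,
       (PySem.List.pyGet? row (2:Int)).getD 0 + max_of_3 [a,b,c,d] 2,
       (PySem.List.pyGet? row (3:Int)).getD 0 + max_of_3 [a,b,c,d] 3] := by
  simp [stepA, List.range_succ, PySem.List.pyGet?, PySem.List.pyIdx?, Int.add_comm]

theorem stepB_sim (a b c d : Int) (row : List Int) :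
    stepB (top2 a b c d) row =
      top2 ((PySem.List.pyGet? row (0:Int)).getD 0 + max_of_3 [a,b,c,d] 0)
           ((PySem.List.pyGet? row (1:Int)).getD 0 + max_of_3 [a,b,c,d] 1)
           ((PySem.List.pyGet? row (2:Int)).getD 0 + max_of_3 [a,b,c,d] 2)
           ((PySem.List.pyGet? row (3:Int)).getD 0 + max_of_3 [a,b,c,d] 3) := by
  show top2 _ _ _ _ = _
  rw [sel0, sel1, sel2, sel3]

theorem fold_sim (rest : List (List Int)) :
    ∀ a b c d : Int, ∃ w x y z : Int,
      rest.foldl stepA [a, b, c, d] = [w, x, y, z] ∧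
      rest.foldl stepB (top2 a b c d) = top2 w x y z := by
  induction rest with
  | nil => intro a b c d; exact ⟨a, b, c, d, rfl, rfl⟩
  | cons r t ih =>
    intro a b c d
    simp only [List.foldl_cons, stepA_shape, stepB_sim]
    exact ih _ _ _ _

-- ===== VERDICT =====
theorem solution_spec : Claim_equal_solution := by
  intro land _ _
  unfold Spec_solution solution solution_alt
  cases land with
  | nil => rfl
  | cons r0 rest =>
    obtain ⟨w, x, y, z, hA, hB⟩ := fold_sim rest
      ((PySem.List.pyGet? r0 0).getD 0) ((PySem.List.pyGet? r0 1).getD 0)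
      ((PySem.List.pyGet? r0 2).getD 0) ((PySem.List.pyGet? r0 3).getD 0)
    simp only [hA, hB, max?_quad, Option.getD_some, top2_fst]
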